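-- pv_equiv track=rewrite | github.com/DragunWF/Competitive-Programming | LeetCode/Hard/longest_valid_parenthesis.py | longest_consecutive
-- ===== SOURCE A (Python) =====
-- from typing import List
--
-- def longest_consecutive(values: List[int]) -> int:
--     longest = 0
--     current = 0
--     for num in values:
--         if num == 1:
--             current += 1
--         else:
--             if current > longest:
--                 longest = current
--             current = 0
--     return max(longest * 2, current * 2)
-- ===== SOURCE B (Python) =====
-- from itertools import groupby
-- from typing import List
--
-- def longest_consecutive(values: List[int]) -> int:
--     return 2 * max((sum(1 for _ in g) for k, g in groupby(values) if k == 1), default=0)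
-- ===== Notes on version B (the rewrite author's own statement) =====
-- stated objective: simpler
-- what changed: Replaced the manual longest/current accumulator loop with a group-then-reduce: itertools.groupby partitions the list into maximal runs, and the result is twice the maximum length of the runs of 1s (default 0).
import Mathlib
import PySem

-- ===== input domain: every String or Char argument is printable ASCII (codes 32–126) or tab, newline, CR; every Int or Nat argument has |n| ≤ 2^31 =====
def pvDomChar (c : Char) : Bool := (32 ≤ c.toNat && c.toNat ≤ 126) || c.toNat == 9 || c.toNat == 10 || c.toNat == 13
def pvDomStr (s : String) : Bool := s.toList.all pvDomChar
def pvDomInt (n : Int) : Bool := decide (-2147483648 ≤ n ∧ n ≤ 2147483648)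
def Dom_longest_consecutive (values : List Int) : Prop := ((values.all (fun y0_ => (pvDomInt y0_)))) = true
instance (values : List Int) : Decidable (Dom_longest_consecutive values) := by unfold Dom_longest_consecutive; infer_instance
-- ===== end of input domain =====

-- B groups the list into maximal runs (as itertools.groupby does) and takes twice the
-- maximum length of the runs of 1s, instead of A's running longest/current counters.

-- ===== PORT A =====
-- literal transliteration of A's accumulator loop: state (longest, current)
def longest_consecutive (values : List Int) : Int :=
  let r := values.foldl
    (fun (s : Int × Int) num =>
      if num = 1 then (s.1, s.2 + 1)
      else ((if s.2 > s.1 then s.2 else s.1), 0))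
    (0, 0)
  max (r.1 * 2) (r.2 * 2)

-- ===== PORT B =====
-- itertools.groupby on a list: the maximal runs of consecutive equal elements
def pvRuns (xs : List Int) : List (List Int) :=
  match xs with
  | [] => []
  | x :: rest => (x :: rest.takeWhile (· == x)) :: pvRuns (rest.dropWhile (· == x))
termination_by xs.length
decreasing_by
  simpa using Nat.lt_succ_of_le (List.length_dropWhile_le _ _)

-- max over the lengths of the 1-runs, default 0, times 2
def longest_consecutive_alt (values : List Int) : Int :=
  2 * (((pvRuns values).filterMap
          (fun g => if g.head? = some 1 then some ((g.length : Int)) else none)).foldl max 0)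

-- ===== PRECONDITION & SPEC =====
def Spec_longest_consecutive (values : List Int) (out : Int) : Prop := out = longest_consecutive_alt values
instance (values : List Int) (out : Int) : Decidable (Spec_longest_consecutive values out) := by unfold Spec_longest_consecutive; infer_instance

-- ===== CLAIM (what is proved, stated in full; the proofs are below) =====
def Claim_equal_longest_consecutive : Prop := ∀ (values : List Int), Dom_longest_consecutive values → Spec_longest_consecutive values (longest_consecutive values)

-- ===== LEMMAS AND PROOFS =====

-- the longest run of 1s reachable from a state with current run length c
def pvBest (c : Int) (xs : List Int) : Int :=
  match xs with
  | [] => c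
  | x :: rest => if x = 1 then pvBest (c + 1) rest else max c (pvBest 0 rest)

theorem pvBest_ge (xs : List Int) : ∀ c : Int, c ≤ pvBest c xs := by
  induction xs with
  | nil => intro c; simp [pvBest]
  | cons x rest ih =>
    intro c
    by_cases hx : x = 1
    · simpa [pvBest, hx] using le_trans (by omega) (ih (c + 1))
    · simp [pvBest, hx]

-- A's loop computes max l (pvBest c xs) from state (l, c)
theorem pvA_loop (xs : List Int) : ∀ l c : Int,
    max (xs.foldl (fun (s : Int × Int) num =>
      if num = 1 then (s.1, s.2 + 1)
      else ((if s.2 > s.1 then s.2 else s.1), 0)) (l, c)).1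
      (xs.foldl (fun (s : Int × Int) num =>
      if num = 1 then (s.1, s.2 + 1)
      else ((if s.2 > s.1 then s.2 else s.1), 0)) (l, c)).2
    = max l (pvBest c xs) := by
  induction xs with
  | nil => intro l c; simp [pvBest]
  | cons x rest ih =>
    intro l c
    by_cases hx : x = 1
    · simp [List.foldl_cons, hx, pvBest, ih]
    · simp only [List.foldl_cons, hx, if_false, pvBest, ih]
      by_cases h : c > l
      · rw [if_pos h]; omega
      · rw [if_neg h]; omega

theorem pvBest_flush (c : Int) (hc : 0 ≤ c) (d : List Int) (hd : d = [] ∨ d.head? ≠ some 1) :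
    pvBest c d = max c (pvBest 0 d) := by
  rcases hd with h | h
  · subst h; simp [pvBest]; omega
  · cases d with
    | nil => simp [pvBest]; omega
    | cons y d' =>
      have hy : y ≠ 1 := by simpa using h
      have h0 : (0:Int) ≤ pvBest 0 d' := pvBest_ge d' 0
      simp [pvBest, hy]
      omega

theorem pvBest_ones (t : List Int) : ∀ (d : List Int) (c : Int),
    (∀ y ∈ t, y = 1) → pvBest c (t ++ d) = pvBest (c + t.length) d := by
  induction t with
  | nil => intro d c _; simp
  | cons u t' ih =>
    intro d c h
    have hu : u = 1 := h u (by simp)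
    have hrec := ih d (c + 1) (fun y hy => h y (by simp [hy]))
    simp only [List.cons_append, pvBest, if_pos hu, hrec]
    congr 1
    simp
    ring

theorem pvBest_nonones (t : List Int) : ∀ (d : List Int),
    (∀ y ∈ t, y ≠ 1) → pvBest 0 (t ++ d) = pvBest 0 d := by
  induction t with
  | nil => intro d _; simp
  | cons u t' ih =>
    intro d h
    have hu : u ≠ 1 := h u (by simp)
    have hrec := ih d (fun y hy => h y (by simp [hy]))
    have h0 : (0:Int) ≤ pvBest 0 d := pvBest_ge _ 0
    simp only [List.cons_append, pvBest, if_neg hu, hrec]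
    omega

theorem foldl_max_max (l : List Int) : ∀ i j : Int,
    l.foldl max (max i j) = max i (l.foldl max j) := by
  induction l with
  | nil => intro i j; simp
  | cons a l ih =>
    intro i j
    simp only [List.foldl_cons]
    rw [max_assoc, ih]

-- B's reduction over the runs
def pvM (gs : List (List Int)) : Int :=
  (gs.filterMap (fun g => if g.head? = some 1 then some ((g.length : Int)) else none)).foldl max 0

theorem pvM_cons_one (t : List Int) (gs : List (List Int)) :
    pvM ((1 :: t) :: gs) = max ((1 : Int) + t.length) (pvM gs) := by
  simp only [pvM, List.filterMap_cons, List.head?_cons]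
  norm_num
  rw [show max (0:Int) (((t.length : Int)) + 1) = max ((1:Int) + t.length) 0 by omega,
    foldl_max_max]

theorem pvM_cons_other (x : Int) (hx : x ≠ 1) (t : List Int) (gs : List (List Int)) :
    pvM ((x :: t) :: gs) = pvM gs := by
  simp [pvM, hx]

theorem pvMain : ∀ (n : Nat) (xs : List Int), xs.length ≤ n → pvBest 0 xs = pvM (pvRuns xs) := by
  intro n
  induction n with
  | zero =>
    intro xs h
    have : xs = [] := List.eq_nil_of_length_eq_zero (Nat.le_zero.mp h)
    subst this
    simp [pvBest, pvRuns, pvM]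
  | succ n ih =>
    intro xs h
    cases xs with
    | nil => simp [pvBest, pvRuns, pvM]
    | cons x rest =>
      have hsplit : rest.takeWhile (· == x) ++ rest.dropWhile (· == x) = rest :=
        List.takeWhile_append_dropWhile
      have hdlen : (rest.dropWhile (· == x)).length ≤ n := by
        have := List.length_dropWhile_le (· == x) rest
        simp at h; omega
      rw [pvRuns]
      by_cases hx : x = 1
      · subst hx
        have ht1 : ∀ y ∈ rest.takeWhile (· == (1:Int)), y = 1 := by
          intro y hy
          simpa using List.mem_takeWhile_imp hy
        have hbd : rest.dropWhile (· == (1:Int)) = [] ∨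
            ((rest.dropWhile (· == (1:Int))).head? ≠ some 1) := by
          cases hdw : rest.dropWhile (· == (1:Int)) with
          | nil => exact Or.inl rfl
          | cons y d' =>
            right
            have hy : ¬ ((y == (1:Int)) = true) := by
              have := List.head?_dropWhile_not (· == (1:Int)) rest
              rw [hdw] at this; simpa using this
            simp only [List.head?_cons]
            intro hy1
            injection hy1 with h
            exact hy (by simp [h])
        have key : pvBest 0 (1 :: rest) = max ((1:Int) + (rest.takeWhile (· == (1:Int))).length)
            (pvBest 0 (rest.dropWhile (· == (1:Int)))) := by
          have h1 : pvBest 0 (1 :: rest) = pvBest 1 rest := by simp [pvBest]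
          rw [h1]
          conv_lhs => rw [← hsplit]
          rw [pvBest_ones _ _ _ ht1, pvBest_flush _ (by positivity) _ hbd]
        rw [key, pvM_cons_one, ih _ hdlen]
      · have ht1 : ∀ y ∈ rest.takeWhile (· == x), y ≠ 1 := by
          intro y hy
          have hyx : y = x := by simpa using List.mem_takeWhile_imp hy
          rw [hyx]; exact hx
        rw [pvM_cons_other x hx]
        have hstep : pvBest 0 (x :: rest) = pvBest 0 rest := by
          have h0 : (0:Int) ≤ pvBest 0 rest := pvBest_ge _ 0
          simp [pvBest, hx]; omega
        rw [hstep]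
        conv_lhs => rw [← hsplit]
        rw [pvBest_nonones _ _ ht1, ih _ hdlen]

-- ===== VERDICT (by name: the statement is the Claim_ definition above) =====
theorem longest_consecutive_spec : Claim_equal_longest_consecutive := by
  intro values _
  unfold Spec_longest_consecutive longest_consecutive longest_consecutive_alt
  have hloop := pvA_loop values 0 0
  have hmain := pvMain values.length values le_rfl
  have h0 : (0:Int) ≤ pvBest 0 values := pvBest_ge _ 0
  have h2 : ∀ a b : Int, max (a * 2) (b * 2) = 2 * max a b := by intro a b; omega
  rw [h2]
  rw [hloop]
  rw [max_eq_right h0, hmain]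
  rfl
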